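-- pv_equiv track=rewrite | github.com/HungryFly/flyARC | Noah_forAnalyses/Noah15.8.py | flatten2D
-- ===== SOURCE A (Python) =====
-- def flatten2D(matrix):
-- 	# This function will take the sum of elements at each position for a series of vectors and make them into 1 sum vector
-- 	flatten = []
-- 	for element in range(len(matrix[0])):
-- 		tempHold = []
-- 		for vector in range(len(matrix)):
-- 			tempHold.append(matrix[vector][element])
-- 		flatten.append(sum(tempHold))
-- 	return flatten
-- ===== SOURCE B (Python) =====
-- def flatten2D(matrix):
--     # Stream over rows maintaining a running column-sum accumulator.
--     result = [0] * len(matrix[0])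
--     for row in matrix:
--         for i in range(len(result)):
--             result[i] += row[i]
--     return result
-- ===== Notes on version B (the rewrite author's own statement) =====
-- stated objective: alternative
-- what changed: B replaces A's per-column materialization (building a temp list of one column's entries and summing it) with a single running accumulator vector updated row by row (transposed nesting, no temporary lists).
import Mathlib
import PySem

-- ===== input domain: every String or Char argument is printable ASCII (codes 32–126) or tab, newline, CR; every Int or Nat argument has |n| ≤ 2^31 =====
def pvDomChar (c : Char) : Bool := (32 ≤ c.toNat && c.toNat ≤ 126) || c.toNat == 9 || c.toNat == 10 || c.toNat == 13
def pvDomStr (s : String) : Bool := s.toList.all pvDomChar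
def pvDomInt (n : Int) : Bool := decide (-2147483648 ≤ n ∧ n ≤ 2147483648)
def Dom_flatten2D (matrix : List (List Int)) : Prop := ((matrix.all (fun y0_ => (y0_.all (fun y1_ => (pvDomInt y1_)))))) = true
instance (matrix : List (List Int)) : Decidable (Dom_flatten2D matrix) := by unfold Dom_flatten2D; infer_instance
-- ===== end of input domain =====

-- B streams over rows with one running column-sum accumulator instead of A's per-column temp-list-and-sum; alternative decomposition, same cost.


-- ===== PORT A =====
-- Indices in A are nonnegative range(len(..)) indices, in range on every input of Pre_;
-- out-of-range access is rendered with default 0 / [] (Python raises there, excluded by Pre_).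
-- the inner loop of A: tempHold = [matrix[vector][element] for vector in range(len(matrix))]
def tempHoldA (matrix : List (List Int)) (element : Nat) : List Int :=
  (List.range matrix.length).foldl
    (fun t vector => t ++ [((matrix.getD vector []).getD element 0)]) []

def flatten2D (matrix : List (List Int)) : List Int :=
  (List.range (matrix.headD []).length).foldl
    (fun flatten element => flatten ++ [(tempHoldA matrix element).sum]) []

-- ===== PORT B =====
-- the inner loop of B: for i in range(len(result)): result[i] += row[i]
def addRowB (res row : List Int) : List Int :=
  (List.range res.length).foldl (fun r i => r.set i (r.getD i 0 + row.getD i 0)) res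

def flatten2D_alt (matrix : List (List Int)) : List Int :=
  matrix.foldl (fun result row => addRowB result row)
    (List.replicate (matrix.headD []).length 0)

-- ===== PRECONDITION & SPEC =====
-- Pre_ excludes exactly the inputs where A raises (IndexError): the empty matrix, and
-- ragged matrices with some row shorter than the first row.
def Pre_flatten2D (matrix : List (List Int)) : Prop :=
  matrix ≠ [] ∧ ∀ row ∈ matrix, (matrix.headD []).length ≤ row.length
instance (matrix : List (List Int)) : Decidable (Pre_flatten2D matrix) := by
  unfold Pre_flatten2D; infer_instance
def pvWitness_flatten2D : List (List Int) := [[1, 2], [3, 4]]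
def Spec_flatten2D (matrix : List (List Int)) (out : List Int) : Prop := out = flatten2D_alt matrix
instance (matrix : List (List Int)) (out : List Int) : Decidable (Spec_flatten2D matrix out) := by unfold Spec_flatten2D; infer_instance

-- ===== CLAIM (what is proved, stated in full; the proofs are below) =====
def Claim_equal_flatten2D : Prop := ∀ (matrix : List (List Int)), Dom_flatten2D matrix → Pre_flatten2D matrix → Spec_flatten2D matrix (flatten2D matrix)

-- ===== LEMMAS AND PROOFS =====

-- appending-fold builds acc ++ map
theorem foldl_append_map {α β : Type} (g : α → β) :
    ∀ (l : List α) (acc : List β),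
      l.foldl (fun t v => t ++ [g v]) acc = acc ++ l.map g := by
  intro l
  induction l with
  | nil => intro acc; simp
  | cons a as ih => intro acc; simp [List.foldl, ih]

theorem range_map_getD {α β : Type} (f : α → β) (xs : List α) (d : α) :
    (List.range xs.length).map (fun v => f (xs.getD v d)) = xs.map f := by
  apply List.ext_getElem
  · simp
  · intro i h1 h2
    simp only [List.getElem_map, List.getElem_range, List.getD]
    rw [List.getElem?_eq_getElem (by simpa using h2)]
    rfl

theorem getD_set (l : List Int) (i j : Nat) (a : Int) :
    (l.set i a).getD j 0 = if i = j ∧ i < l.length then a else l.getD j 0 := by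
  simp only [List.getD, List.getElem?_set]
  split_ifs with h h1 h2 <;> simp_all
  omega

-- pointwise value of the inner set-fold after processing indices < k
theorem setfold_getD (row : List Int) :
    ∀ (k : Nat) (res : List Int), k ≤ res.length →
      ((List.range k).foldl (fun r i => r.set i (r.getD i 0 + row.getD i 0)) res).length
        = res.length ∧
      ∀ j, ((List.range k).foldl (fun r i => r.set i (r.getD i 0 + row.getD i 0)) res).getD j 0
        = if j < k then res.getD j 0 + row.getD j 0 else res.getD j 0 := by
  intro k
  induction k with
  | zero => intro res _; simp
  | succ k ih =>
    intro res hk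
    obtain ⟨hlen, hval⟩ := ih res (by omega)
    rw [List.range_succ, List.foldl_append]
    simp only [List.foldl_cons, List.foldl_nil]
    set G := (List.range k).foldl (fun r i => r.set i (r.getD i 0 + row.getD i 0)) res with hG
    constructor
    · simp [List.length_set, hlen]
    · intro j
      rw [getD_set]
      by_cases hj : k = j
      · subst hj
        have hkR : k < res.length := by omega
        have he : G.getD k 0 = res.getD k 0 := by rw [hval k]; simp
        rw [if_pos ⟨rfl, by rw [hlen]; omega⟩, if_pos (by omega), he]
      · have hcond : ¬ (k = j ∧ k < G.length) := by tauto
        simp only [hcond, if_false]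
        rw [hval j]
        by_cases h1 : j < k <;> by_cases h2 : j < k + 1 <;> simp [h1, h2] <;> omega

theorem addRowB_len (res row : List Int) : (addRowB res row).length = res.length :=
  (setfold_getD row res.length res le_rfl).1

theorem addRowB_getD (res row : List Int) (j : Nat) (hj : j < res.length) :
    (addRowB res row).getD j 0 = res.getD j 0 + row.getD j 0 := by
  have := (setfold_getD row res.length res le_rfl).2 j
  simpa [addRowB, hj] using this

-- the outer fold of B: length preserved and pointwise sums accumulate
theorem foldB_len : ∀ (m : List (List Int)) (init : List Int),
    (m.foldl (fun result row => addRowB result row) init).length = init.length := by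
  intro m
  induction m with
  | nil => intro init; simp
  | cons r rs ih => intro init; simp [List.foldl, ih, addRowB_len]

theorem foldB_getD : ∀ (m : List (List Int)) (init : List Int) (j : Nat), j < init.length →
    (m.foldl (fun result row => addRowB result row) init).getD j 0
      = init.getD j 0 + (m.map (fun row => row.getD j 0)).sum := by
  intro m
  induction m with
  | nil => intro init j hj; simp
  | cons r rs ih =>
    intro init j hj
    simp only [List.foldl_cons, List.map_cons, List.sum_cons]
    rw [ih (addRowB init r) j (by rw [addRowB_len]; exact hj), addRowB_getD init r j hj]
    ring

theorem flatten2D_eq_map (matrix : List (List Int)) :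
    flatten2D matrix =
      (List.range (matrix.headD []).length).map
        (fun j => (matrix.map (fun row => row.getD j 0)).sum) := by
  unfold flatten2D
  rw [foldl_append_map (fun e => (tempHoldA matrix e).sum)]
  simp only [List.nil_append]
  apply List.map_congr_left
  intro e _
  unfold tempHoldA
  rw [foldl_append_map, range_map_getD (fun row => row.getD e 0) matrix []]
  simp

-- ===== VERDICT (by name: the statement is the Claim_ definition above) =====
theorem flatten2D_spec : Claim_equal_flatten2D := by
  intro matrix _ _
  unfold Spec_flatten2D
  rw [flatten2D_eq_map]
  apply List.ext_getElem
  · simp [flatten2D_alt, foldB_len]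
  · intro j h1 h2
    have hj : j < (matrix.headD []).length := by simpa using h1
    have hB : (flatten2D_alt matrix).getD j 0
        = (matrix.map (fun row => row.getD j 0)).sum := by
      unfold flatten2D_alt
      rw [foldB_getD matrix _ j (by simpa using hj)]
      have : (List.replicate (matrix.headD []).length (0 : Int)).getD j 0 = 0 := by
        simp only [List.getD, List.getElem?_replicate]
        split <;> rfl
      rw [this]; ring
    have hA : ((List.range (matrix.headD []).length).map
        (fun j => (matrix.map (fun row => row.getD j 0)).sum))[j]'h1
        = (matrix.map (fun row => row.getD j 0)).sum := by
      simp
    rw [hA]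
    have : (flatten2D_alt matrix)[j]'h2 = (flatten2D_alt matrix).getD j 0 := by
      simp [List.getD, List.getElem?_eq_getElem h2]
    rw [this, hB]
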